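-- pv_equiv track=rewrite | github.com/greenspangle/LIN7077_Humanities | assignments/a3_collections_iteration/a3_answers.py | seq_collections
-- ===== SOURCE A (Python) =====
-- def seq_collections(an_int):
--     """Return a tuple containing the integers 1 to an_int inclusive,
--     as a string, a set, and a list."""
--     ints_str = ''
--     ints_set = set()
--     ints_list = [[], []]
--     for i in range(1, an_int + 1):
--         ints_str += str(i) + ' '
--         ints_set.add(i)
--         if i % 2:
--             # index i is odd, so add to second sublist
--             ints_list[1].append(i)
--         else:
--             # index i is even, so add it to first sublist
--             ints_list[0].append(i)
--     #  remove the trailing space ' ' from the end of ints_str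
--     ints_str = ints_str[:-1]
--     # reverse the second sublist
--     ints_list[1].reverse()
--     return ints_str, ints_set, ints_list
-- ===== SOURCE B (Python) =====
-- def seq_collections(an_int):
--     """Return a tuple containing the integers 1 to an_int inclusive,
--     as a string, a set, and a list."""
--     ints_str = ' '.join(str(i) for i in range(1, an_int + 1))
--     ints_set = set(range(1, an_int + 1))
--     evens = list(range(2, an_int + 1, 2))
--     top_odd = an_int if an_int % 2 else an_int - 1
--     odds_desc = list(range(top_odd, 0, -2))
--     return ints_str, ints_set, [evens, odds_desc]
-- ===== Notes on version B (the rewrite author's own statement) =====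
-- stated objective: simpler
-- what changed: Replaced A's single fused parity-branching accumulation loop (string += str(i)+' ', set.add, append-then-reverse of the odds) by three independent closed-form passes: ' '.join over the range for the string, set(range(...)) for the set, and two arithmetic ranges for the list - evens ascending and odds generated directly in descending order so no reverse is needed.
import Mathlib
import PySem

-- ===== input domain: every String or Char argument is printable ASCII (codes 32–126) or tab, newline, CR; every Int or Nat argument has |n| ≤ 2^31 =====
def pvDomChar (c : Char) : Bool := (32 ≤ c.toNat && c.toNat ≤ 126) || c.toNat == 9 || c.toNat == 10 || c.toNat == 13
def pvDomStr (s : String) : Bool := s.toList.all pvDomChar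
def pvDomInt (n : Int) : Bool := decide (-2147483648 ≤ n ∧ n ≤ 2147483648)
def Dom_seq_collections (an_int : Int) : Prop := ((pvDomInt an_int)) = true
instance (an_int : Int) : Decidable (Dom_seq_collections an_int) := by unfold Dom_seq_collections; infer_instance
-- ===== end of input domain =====

-- B replaces A's single fused parity-branching loop by three independent closed-form passes
-- (a join over the range for the string, set(range(...)) for the set, and two arithmetic
-- ranges — evens ascending, odds descending — for the list); objective: simpler.

-- ===== PORT A =====
-- one fused loop over range(1, an_int+1) carrying (string-as-chars, set, evens, odds)
def seq_collections (an_int : Int) : String × List Int × List (List Int) :=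
  let st :=
    (PySem.List.pyRange 1 (an_int + 1) 1).foldl
      (fun (acc : List Char × PySem.Set Int × List Int × List Int) i =>
        let s := acc.1 ++ PySem.Int.toChars i ++ [' ']
        let se := PySem.Set.add acc.2.1 i
        let l :=
          if PySem.Int.mod i 2 ≠ 0 then (acc.2.2.1, acc.2.2.2 ++ [i])
          else (acc.2.2.1 ++ [i], acc.2.2.2)
        (s, se, l))
      (([] : List Char), ([] : PySem.Set Int), ([] : List Int), ([] : List Int))
  (String.ofList (PySem.List.slice st.1 none (some (-1))), st.2.1,
    [st.2.2.1, st.2.2.2.reverse])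

-- ===== PORT B =====
def seq_collections_alt (an_int : Int) : String × List Int × List (List Int) :=
  let ints_str := PySem.Str.join " " ((PySem.List.pyRange 1 (an_int + 1) 1).map PySem.Int.toStr)
  let ints_set : PySem.Set Int := PySem.Set.ofList (PySem.List.pyRange 1 (an_int + 1) 1)
  let evens := PySem.List.pyRange 2 (an_int + 1) 2
  let top_odd := if PySem.Int.mod an_int 2 ≠ 0 then an_int else an_int - 1
  let odds_desc := PySem.List.pyRange top_odd 0 (-2)
  (ints_str, ints_set, [evens, odds_desc])

-- ===== PRECONDITION & SPEC =====
def Spec_seq_collections (an_int : Int) (out : String × List Int × List (List Int)) : Prop := out = seq_collections_alt an_int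
instance (an_int : Int) (out : String × List Int × List (List Int)) : Decidable (Spec_seq_collections an_int out) := by unfold Spec_seq_collections; infer_instance

-- ===== CLAIM (what is proved, stated in full; the proofs are below) =====
def Claim_equal_seq_collections : Prop := ∀ (an_int : Int), Dom_seq_collections an_int → Spec_seq_collections an_int (seq_collections an_int)

-- ===== LEMMAS AND PROOFS =====
def pvInts (m : Nat) : List Int := (List.range m).map (fun k : Nat => (1 : Int) + k)
lemma pvInts_succ (m : Nat) : pvInts (m + 1) = pvInts m ++ [(1 : Int) + m] := by
  simp [pvInts, List.range_succ]
lemma pvMod_two (i : Int) : PySem.Int.mod i 2 = i % 2 := by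
  simp [PySem.Int.mod, Int.fmod_eq_emod]
lemma pvNotMem_ints (m : Nat) : (1 : Int) + m ∉ pvInts m := by
  intro h
  unfold pvInts at h
  rw [List.mem_map] at h
  obtain ⟨k, hk, he⟩ := h
  rw [List.mem_range] at hk
  omega
lemma pvLoopA (m : Nat) :
    (pvInts m).foldl
      (fun (acc : List Char × PySem.Set Int × List Int × List Int) i =>
        let s := acc.1 ++ PySem.Int.toChars i ++ [' ']
        let se := PySem.Set.add acc.2.1 i
        let l :=
          if PySem.Int.mod i 2 ≠ 0 then (acc.2.2.1, acc.2.2.2 ++ [i])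
          else (acc.2.2.1 ++ [i], acc.2.2.2)
        (s, se, l))
      (([] : List Char), ([] : PySem.Set Int), ([] : List Int), ([] : List Int)) =
    ( ((pvInts m).map (fun i => PySem.Int.toChars i ++ [' '])).flatten,
      pvInts m,
      (List.range (m / 2)).map (fun k : Nat => (2 : Int) + 2 * k),
      (List.range ((m + 1) / 2)).map (fun k : Nat => (1 : Int) + 2 * k) ) := by
  induction m with
  | zero => simp [pvInts]
  | succ m ih =>
    rw [pvInts_succ, List.foldl_append, ih]
    simp only [List.foldl_cons, List.foldl_nil]
    have hadd : PySem.Set.add (pvInts m) ((1 : Int) + m) = pvInts m ++ [(1 : Int) + m] := by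
      have h := pvNotMem_ints m
      simp only [PySem.Set.add, PySem.Set.contains, List.contains_eq_mem]
      rw [if_neg (by simpa using h)]
    by_cases hp : m % 2 = 0
    · have hmod : PySem.Int.mod (1 + (m : Int)) 2 ≠ 0 := by rw [pvMod_two]; omega
      rw [if_pos hmod]
      have h3 : (m + 1) / 2 = m / 2 := by omega
      have h4 : (m + 1 + 1) / 2 = (m + 1) / 2 + 1 := by omega
      refine Prod.ext ?_ (Prod.ext ?_ (Prod.ext ?_ ?_))
      · simp [pvInts_succ]
      · simp [hadd, pvInts_succ]
      · simp [h3]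
      · rw [h4, List.range_succ]
        simp
        omega
    · have hmod : ¬ PySem.Int.mod (1 + (m : Int)) 2 ≠ 0 := by rw [pvMod_two]; omega
      rw [if_neg hmod]
      have h3 : (m + 1) / 2 = m / 2 + 1 := by omega
      have h4 : (m + 1 + 1) / 2 = (m + 1) / 2 := by omega
      refine Prod.ext ?_ (Prod.ext ?_ (Prod.ext ?_ ?_))
      · simp [pvInts_succ]
      · simp [hadd, pvInts_succ]
      · rw [h3, List.range_succ]
        simp
        omega
      · simp [h4]

lemma pvFlatten_dropLast (c : Char) (ws : List (List Char)) :
    ((ws.map (fun w => w ++ [c])).flatten).dropLast = List.intercalate [c] ws := by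
  induction ws with
  | nil => simp [List.intercalate]
  | cons w ws ih =>
    cases ws with
    | nil => simp [List.intercalate]
    | cons w' ws' =>
      rw [List.map_cons, List.flatten_cons, List.dropLast_append, if_neg (by simp), ih]
      have h2 : List.intercalate [c] (w :: w' :: ws') =
          w ++ [c] ++ List.intercalate [c] (w' :: ws') := by
        simp [List.intercalate, List.intersperse]
      rw [h2]

lemma pvReverse_map_range (q : Nat) :
    ((List.range q).map (fun k : Nat => (1 : Int) + 2 * k)).reverse =
    (List.range q).map (fun k : Nat => (2 * q - 1 : Int) - 2 * k) := by
  apply List.ext_getElem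
  · simp
  · intro i h1 h2
    simp only [List.length_map, List.length_range] at h2
    rw [List.getElem_reverse]
    simp only [List.getElem_map, List.getElem_range, List.length_map, List.length_range]
    have : q - 1 - i < q := by omega
    push_cast
    omega

lemma pvEvens_eq (an_int : Int) :
    PySem.List.pyRange 2 (an_int + 1) 2 =
    (List.range (an_int.toNat / 2)).map (fun k : Nat => (2 : Int) + 2 * k) := by
  rw [PySem.List.pyRange_of_pos 2 (an_int + 1) (by norm_num)]
  by_cases h : 2 < an_int + 1
  · rw [if_pos h]
    have hq : ((an_int + 1 - 2 + 2 - 1) / 2).toNat = an_int.toNat / 2 := by omega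
    rw [hq]
  · rw [if_neg h]
    have hq : an_int.toNat / 2 = 0 := by omega
    rw [hq]

lemma pvOdds_eq (an_int : Int) :
    PySem.List.pyRange (if PySem.Int.mod an_int 2 ≠ 0 then an_int else an_int - 1) 0 (-2) =
    ((List.range ((an_int.toNat + 1) / 2)).map (fun k : Nat => (1 : Int) + 2 * k)).reverse := by
  rw [pvReverse_map_range, pvMod_two]
  rw [PySem.List.pyRange_of_neg _ 0 (by norm_num : (-2 : Int) < 0)]
  simp only [neg_neg, sub_zero]
  by_cases h : an_int % 2 ≠ 0
  · rw [if_pos h]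
    by_cases h0 : 0 < an_int
    · rw [if_pos h0]
      have hq : ((an_int + 2 - 1) / 2).toNat = (an_int.toNat + 1) / 2 := by omega
      rw [hq]
      apply List.map_congr_left
      intro k hk
      rw [List.mem_range] at hk
      have h2 : an_int = 2 * (((an_int.toNat + 1) / 2 : Nat) : Int) - 1 := by omega
      omega
    · rw [if_neg h0]
      have hq : (an_int.toNat + 1) / 2 = 0 := by omega
      rw [hq]
      simp
  · rw [if_neg h]
    by_cases h0 : 0 < an_int - 1
    · rw [if_pos h0]
      have hq : ((an_int - 1 + 2 - 1) / 2).toNat = (an_int.toNat + 1) / 2 := by omega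
      rw [hq]
      apply List.map_congr_left
      intro k hk
      rw [List.mem_range] at hk
      have h2 : an_int - 1 = 2 * (((an_int.toNat + 1) / 2 : Nat) : Int) - 1 := by omega
      omega
    · rw [if_neg h0]
      have hq : (an_int.toNat + 1) / 2 = 0 := by omega
      rw [hq]
      simp

lemma pvString_eq (m : Nat) :
    String.ofList (PySem.List.slice
        (((pvInts m).map (fun i => PySem.Int.toChars i ++ [' '])).flatten) none (some (-1))) =
    PySem.Str.join " " ((pvInts m).map PySem.Int.toStr) := by
  have hmm : (pvInts m).map (fun i => PySem.Int.toChars i ++ [' ']) =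
      ((pvInts m).map PySem.Int.toChars).map (fun w => w ++ [' ']) := by
    rw [List.map_map]; rfl
  rw [PySem.List.slice_to_neg_one, hmm, pvFlatten_dropLast]
  have h : PySem.Str.join " " ((pvInts m).map PySem.Int.toStr) =
      String.ofList (PySem.Chars.join " ".toList (((pvInts m).map PySem.Int.toStr).map String.toList)) := rfl
  rw [h]
  congr 1
  rw [List.map_map]
  simp only [PySem.Chars.join]
  congr 1
  apply List.map_congr_left
  intro i _
  exact (PySem.Int.toList_toStr i).symm

lemma pvRange_eq_ints (an_int : Int) :
    PySem.List.pyRange 1 (an_int + 1) 1 = pvInts an_int.toNat := by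
  rw [PySem.List.pyRange_one]
  have h : an_int + 1 - 1 = an_int := by ring
  rw [h]
  rfl

-- ===== VERDICT (by name: the statement is the Claim_ definition above) =====
theorem seq_collections_spec : Claim_equal_seq_collections := by
  intro an_int _
  unfold Spec_seq_collections seq_collections seq_collections_alt
  rw [pvRange_eq_ints, pvLoopA]
  dsimp only
  refine Prod.ext ?_ (Prod.ext ?_ ?_)
  · exact pvString_eq an_int.toNat
  · rw [← pvRange_eq_ints]
    exact (PySem.Set.ofList_eq_self_of_nodup _
      (PySem.List.nodup_pyRange_one 1 (an_int + 1))).symm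
  · rw [pvEvens_eq, pvOdds_eq]
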